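-- pv_equiv track=rewrite | github.com/gb1/Advent-of-Code-2022 | day9/day9.py | rope_map
-- ===== SOURCE A (Python) =====
-- def rope_map(head, tail, size):
--     rope = []
--     line = []
--     for y in range(-size, size):
--         for x in range(-size, size):
--             if head == (x, y):
--                 line.append("H")
--             elif tail == (x, y):
--                 line.append("T")
--             elif x == 0 and y == 0:
--                 line.append("S")
--             else:
--                 line += ["."]
--         rope.append(line)
--         line = []
--     rope.reverse()
--     return rope
-- ===== SOURCE B (Python) =====
-- def rope_map(head, tail, size):
--     n = 2 * size
--     grid = [["."] * n for _ in range(n)]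
--     for (x, y), ch in (((0, 0), "S"), (tail, "T"), (head, "H")):
--         if -size <= x < size and -size <= y < size:
--             grid[size - 1 - y][x + size] = ch
--     return grid
-- ===== Notes on version B (the rewrite author's own statement) =====
-- stated objective: simpler
-- what changed: Instead of deciding each cell with a nested per-cell 4-way branch and reversing at the end, B fills a uniform grid of dots (list repetition) and performs three direct bounds-checked index writes (S, then T, then H).
import Mathlib
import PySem

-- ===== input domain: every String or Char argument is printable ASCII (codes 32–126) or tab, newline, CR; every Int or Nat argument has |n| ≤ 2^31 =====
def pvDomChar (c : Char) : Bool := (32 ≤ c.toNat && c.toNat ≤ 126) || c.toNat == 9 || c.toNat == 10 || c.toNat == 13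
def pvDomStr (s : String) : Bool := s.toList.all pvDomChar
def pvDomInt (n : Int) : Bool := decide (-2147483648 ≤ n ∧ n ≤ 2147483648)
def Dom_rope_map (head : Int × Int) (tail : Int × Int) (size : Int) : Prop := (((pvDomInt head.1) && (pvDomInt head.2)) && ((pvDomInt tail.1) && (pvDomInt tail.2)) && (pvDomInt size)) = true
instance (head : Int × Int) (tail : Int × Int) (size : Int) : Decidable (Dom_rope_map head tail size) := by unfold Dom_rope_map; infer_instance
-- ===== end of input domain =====

-- B builds the grid as a uniform field of dots and writes "S", "T", "H" by direct
-- index arithmetic (bounds-checked), instead of A's per-cell 4-way branch + reverse.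

-- ===== PORT A =====
def rope_map (head : Int × Int) (tail : Int × Int) (size : Int) : List (List String) :=
  let rope := (PySem.List.pyRange (-size) size 1).foldl (fun rope y =>
    let line := (PySem.List.pyRange (-size) size 1).foldl (fun line x =>
      if head = (x, y) then line ++ ["H"]
      else if tail = (x, y) then line ++ ["T"]
      else if x = 0 ∧ y = 0 then line ++ ["S"]
      else line ++ ["."]) ([] : List String)
    rope ++ [line]) ([] : List (List String))
  rope.reverse

-- ===== PORT B =====
def rope_map_alt (head : Int × Int) (tail : Int × Int) (size : Int) : List (List String) :=
  let n := (2 * size).toNat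
  let grid := List.replicate n (List.replicate n ".")
  [((0, 0), "S"), (tail, "T"), (head, "H")].foldl (fun g pc =>
    if -size ≤ pc.1.1 ∧ pc.1.1 < size ∧ -size ≤ pc.1.2 ∧ pc.1.2 < size then
      PySem.List.pySetD g (size - 1 - pc.1.2)
        (PySem.List.pySetD (PySem.List.pyGetD g (size - 1 - pc.1.2) []) (pc.1.1 + size) pc.2)
    else g) grid

-- ===== PRECONDITION & SPEC =====
def Spec_rope_map (head : Int × Int) (tail : Int × Int) (size : Int) (out : List (List String)) : Prop := out = rope_map_alt head tail size
instance (head : Int × Int) (tail : Int × Int) (size : Int) (out : List (List String)) : Decidable (Spec_rope_map head tail size out) := by unfold Spec_rope_map; infer_instance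

-- ===== CLAIM (what is proved, stated in full; the proofs are below) =====
def Claim_equal_rope_map : Prop := ∀ (head : Int × Int) (tail : Int × Int) (size : Int), Dom_rope_map head tail size → Spec_rope_map head tail size (rope_map head tail size)

-- ===== LEMMAS AND PROOFS =====

-- the value A's inner branch puts in the cell at coordinates (x, y)
def cellOf (head tail : Int × Int) (x y : Int) : String :=
  if head = (x, y) then "H" else if tail = (x, y) then "T" else if x = 0 ∧ y = 0 then "S" else "."

-- B's single bounds-checked write (the body of B's fold)
def stepOf (size : Int) (g : List (List String)) (pc : (Int × Int) × String) : List (List String) :=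
  if -size ≤ pc.1.1 ∧ pc.1.1 < size ∧ -size ≤ pc.1.2 ∧ pc.1.2 < size then
    PySem.List.pySetD g (size - 1 - pc.1.2)
      (PySem.List.pySetD (PySem.List.pyGetD g (size - 1 - pc.1.2) []) (pc.1.1 + size) pc.2)
  else g

lemma pyRange_sym (s : Int) :
    PySem.List.pyRange (-s) s 1 = (List.range (2 * s).toNat).map (fun k : Nat => -s + (k : Int)) := by
  simp only [PySem.List.pyRange, one_ne_zero, if_false, if_pos (by norm_num : (0:Int) < 1)]
  split_ifs with h
  · have : (s - -s + 1 - 1) / 1 = 2 * s := by omega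
    rw [this]; simp only [one_mul]
  · have : (2 * s).toNat = 0 := by omega
    simp [this]

lemma reverse_map_range {α : Type} (n : Nat) (f : Nat → α) :
    ((List.range n).map f).reverse = (List.range n).map (fun r => f (n - 1 - r)) := by
  apply List.ext_getElem
  · simp
  · intro i h1 h2
    simp at h1 h2 ⊢

lemma pySetD_in_range {α : Type} (xs : List α) (i : Int) (v : α) (h0 : 0 ≤ i)
    (h : i < xs.length) : PySem.List.pySetD xs i v = xs.set i.toNat v := by
  simp [PySem.List.pySetD, PySem.List.pySet?, PySem.List.pyIdx?, h0, h]

lemma set_map_range {α : Type} (n : Nat) (f : Nat → α) (i : Nat) (v : α) :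
    ((List.range n).map f).set i v = (List.range n).map (fun k => if k = i then v else f k) := by
  apply List.ext_getElem
  · simp
  · intro j h1 h2
    rw [List.getElem_set, List.getElem_map, List.getElem_range]
    by_cases h : i = j
    · simp [h]
    · rw [if_neg h, List.getElem_map, List.getElem_range, if_neg (show ¬ j = i from fun hh => h hh.symm)]

lemma rope_map_mapform (head tail : Int × Int) (size : Int) :
    rope_map head tail size =
      (List.range (2 * size).toNat).map (fun r =>
        (List.range (2 * size).toNat).map (fun (c : Nat) =>
          cellOf head tail (-size + (c : Int)) (-size + (((2 * size).toNat - 1 - r : Nat) : Int)))) := by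
  have hinner : ∀ (y : Int) (l : List Int),
      l.foldl (fun line x =>
        if head = (x, y) then line ++ ["H"]
        else if tail = (x, y) then line ++ ["T"]
        else if x = 0 ∧ y = 0 then line ++ ["S"]
        else line ++ ["."]) ([] : List String)
        = l.map (fun x => cellOf head tail x y) := by
    intro y l
    have hb : (fun (line : List String) (x : Int) =>
        if head = (x, y) then line ++ ["H"]
        else if tail = (x, y) then line ++ ["T"]
        else if x = 0 ∧ y = 0 then line ++ ["S"]
        else line ++ ["."]) = fun line x => line ++ [cellOf head tail x y] := by
      funext line x
      simp only [cellOf]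
      split_ifs <;> rfl
    rw [hb, PySem.List.foldl_append_singleton_eq_map]
    simp
  have houter : (fun (rope : List (List String)) (y : Int) =>
      rope ++ [(PySem.List.pyRange (-size) size 1).foldl (fun line x =>
        if head = (x, y) then line ++ ["H"]
        else if tail = (x, y) then line ++ ["T"]
        else if x = 0 ∧ y = 0 then line ++ ["S"]
        else line ++ ["."]) ([] : List String)])
      = fun rope y => rope ++ [(PySem.List.pyRange (-size) size 1).map (fun x => cellOf head tail x y)] := by
    funext rope y; rw [hinner]
  simp only [rope_map]
  rw [houter, PySem.List.foldl_append_singleton_eq_map, List.nil_append]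
  rw [pyRange_sym, List.map_map, reverse_map_range]
  apply List.map_congr_left
  intro r hr
  simp only [Function.comp_apply]
  rw [List.map_map]
  rfl

lemma stepOf_mapform (s : Int) (hs : 0 < s) (g : Nat → Nat → String) (x y : Int) (ch : String) :
    stepOf s ((List.range (2 * s).toNat).map (fun r => (List.range (2 * s).toNat).map (g r))) ((x, y), ch)
      = (List.range (2 * s).toNat).map (fun r => (List.range (2 * s).toNat).map (fun c =>
          if (-s ≤ x ∧ x < s ∧ -s ≤ y ∧ y < s) ∧ r = (s - 1 - y).toNat ∧ c = (x + s).toNat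
          then ch else g r c)) := by
  simp only [stepOf]
  split_ifs with hg
  · obtain ⟨hx1, hx2, hy1, hy2⟩ := hg
    have hlen : ((List.range (2 * s).toNat).map (fun r => (List.range (2 * s).toNat).map (g r))).length = (2 * s).toNat := by simp
    rw [pySetD_in_range _ _ _ (by omega) (by rw [hlen]; omega)]
    rw [PySem.List.pyGetD_eq_getElem _ _ (by omega) (by rw [hlen]; omega)]
    rw [List.getElem_map, List.getElem_range]
    rw [pySetD_in_range _ _ _ (by omega) (by simp; omega)]
    rw [set_map_range, set_map_range]
    apply List.map_congr_left
    intro r hr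
    simp only [List.mem_range] at hr
    by_cases hri : r = (s - 1 - y).toNat
    · simp only [if_pos hri]
      apply List.map_congr_left
      intro c hc
      simp only [List.mem_range] at hc
      by_cases hcj : c = (x + s).toNat
      · simp [hcj, hri, hx1, hx2, hy1, hy2]
      · simp [hcj, hri]
    · simp only [if_neg hri]
      apply List.map_congr_left
      intro c hc
      have : ¬((-s ≤ x ∧ x < s ∧ -s ≤ y ∧ y < s) ∧ r = (s - 1 - y).toNat ∧ c = (x + s).toNat) := by
        intro ⟨_, h2, _⟩; exact hri h2
      rw [if_neg this]
  · apply List.map_congr_left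
    intro r hr
    apply List.map_congr_left
    intro c hc
    have : ¬((-s ≤ x ∧ x < s ∧ -s ≤ y ∧ y < s) ∧ r = (s - 1 - y).toNat ∧ c = (x + s).toNat) := by
      intro ⟨h1, _⟩; exact hg h1
    rw [if_neg this]

lemma coord_iff (a b s : Int) (hs : 0 < s) (r c : Nat)
    (hr : r < (2 * s).toNat) (hc : c < (2 * s).toNat) :
    (a = -s + (c : Int) ∧ b = -s + (((2 * s).toNat - 1 - r : Nat) : Int)) ↔
      ((-s ≤ a ∧ a < s ∧ -s ≤ b ∧ b < s) ∧ r = (s - 1 - b).toNat ∧ c = (a + s).toNat) := by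
  omega

lemma cell_pointwise (hx hy tx ty : Int) (s : Int) (hs : 0 < s) (r c : Nat)
    (hr : r < (2 * s).toNat) (hc : c < (2 * s).toNat) :
    cellOf (hx, hy) (tx, ty) (-s + (c : Int)) (-s + (((2 * s).toNat - 1 - r : Nat) : Int))
      = (if (-s ≤ hx ∧ hx < s ∧ -s ≤ hy ∧ hy < s) ∧ r = (s - 1 - hy).toNat ∧ c = (hx + s).toNat then "H"
         else if (-s ≤ tx ∧ tx < s ∧ -s ≤ ty ∧ ty < s) ∧ r = (s - 1 - ty).toNat ∧ c = (tx + s).toNat then "T"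
         else if (-s ≤ (0:Int) ∧ (0:Int) < s ∧ -s ≤ (0:Int) ∧ (0:Int) < s) ∧ r = (s - 1 - 0).toNat ∧ c = ((0:Int) + s).toNat then "S"
         else ".") := by
  have e1 := coord_iff hx hy s hs r c hr hc
  have e2 := coord_iff tx ty s hs r c hr hc
  have e3 := (and_congr eq_comm eq_comm).trans (coord_iff 0 0 s hs r c hr hc)
  simp only [cellOf, Prod.mk.injEq]
  exact if_congr e1 rfl (if_congr e2 rfl (if_congr e3 rfl rfl))

-- ===== VERDICT (by name: the statement is the Claim_ definition above) =====
theorem rope_map_spec : Claim_equal_rope_map := by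
  intro head tail size _
  show rope_map head tail size = rope_map_alt head tail size
  have hB : rope_map_alt head tail size
      = stepOf size (stepOf size (stepOf size
          (List.replicate (2 * size).toNat (List.replicate (2 * size).toNat "."))
          ((0, 0), "S")) (tail, "T")) (head, "H") := rfl
  rw [rope_map_mapform, hB]
  by_cases hs : 0 < size
  · have hrep : List.replicate (2 * size).toNat (List.replicate (2 * size).toNat ".")
        = (List.range (2 * size).toNat).map (fun _ => (List.range (2 * size).toNat).map (fun _ => ".")) := by
      simp [List.map_const']
    rw [hrep, stepOf_mapform size hs, stepOf_mapform size hs, stepOf_mapform size hs]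
    apply List.map_congr_left
    intro r hr
    apply List.map_congr_left
    intro c hc
    simp only [List.mem_range] at hr hc
    rcases head with ⟨hx, hy⟩
    rcases tail with ⟨tx, ty⟩
    exact cell_pointwise hx hy tx ty size hs r c hr hc
  · have hn : (2 * size).toNat = 0 := by omega
    have hsle : size ≤ 0 := by omega
    have hg : ∀ x y : Int, ¬(-size ≤ x ∧ x < size ∧ -size ≤ y ∧ y < size) := by
      intro x y; omega
    have hstep : ∀ (g : List (List String)) (pc : (Int × Int) × String), stepOf size g pc = g := by
      intro g pc
      simp only [stepOf]
      rw [if_neg (hg pc.1.1 pc.1.2)]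
    rw [hstep, hstep, hstep, hn]
    simp
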